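-- pv_equiv track=rewrite | github.com/DretzHA/ArtigoDataset | 1. Arquivos Python/2. analise_azimute.py | filtrar_arquivos
-- ===== SOURCE A (Python) =====
-- considerar_arquivos = {
--     "ORT": False,
--     "SYLABS": False,
--     "UBLOX": False,
--     "4T": True,
--     "3T": False,
--     "OUTROS": False
-- }
--
-- def filtrar_arquivos(data_files):
--     # Filtrar arquivos específicos
--     if considerar_arquivos["ORT"] and not considerar_arquivos["4T"]:
--         data_files = [f for f in data_files if f.startswith('ORT')]
--     elif not considerar_arquivos["ORT"] and considerar_arquivos["4T"]:
--         data_files = [f for f in data_files if '4T' in f and not f.startswith('ORT')]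
--     else:
--         if not considerar_arquivos["ORT"]:
--             data_files = [f for f in data_files if not f.startswith('ORT')]
--         if not considerar_arquivos["SYLABS"]:
--             data_files = [f for f in data_files if 'SYLABS' not in f]
--         if not considerar_arquivos["UBLOX"]:
--             data_files = [f for f in data_files if 'UBLOX' not in f]
--         if not considerar_arquivos["4T"]:
--             data_files = [f for f in data_files if '4T' not in f]
--         if not considerar_arquivos["3T"]:
--             data_files = [f for f in data_files if '3T' not in f]
--
--     # Excluir arquivos "OUTROS" se considerar_arquivos["OUTROS"] for False
--     if not considerar_arquivos["OUTROS"]: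
--         data_files = [f for f in data_files if (
--             f.startswith('ORT') or
--             'SYLABS' in f or
--             'UBLOX' in f or
--             '4T' in f or
--             '3T' in f
--         )]
--
--     return data_files
-- ===== SOURCE B (Python) =====
-- considerar_arquivos = {
--     "ORT": False,
--     "SYLABS": False,
--     "UBLOX": False,
--     "4T": True,
--     "3T": False,
--     "OUTROS": False
-- }
--
-- def filtrar_arquivos(data_files):
--     # One pass: a single per-file predicate folds the branch logic and the OUTROS check.
--     c = considerar_arquivos
--     def keep(f):
--         if c["ORT"] and not c["4T"]:
--             ok = f.startswith('ORT')
--         elif not c["ORT"] and c["4T"]: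
--             ok = '4T' in f and not f.startswith('ORT')
--         else:
--             ok = ((c["ORT"] or not f.startswith('ORT'))
--                   and (c["SYLABS"] or 'SYLABS' not in f)
--                   and (c["UBLOX"] or 'UBLOX' not in f)
--                   and (c["4T"] or '4T' not in f)
--                   and (c["3T"] or '3T' not in f))
--         if not c["OUTROS"]:
--             ok = ok and (f.startswith('ORT') or 'SYLABS' in f or
--                          'UBLOX' in f or '4T' in f or '3T' in f)
--         return ok
--     return [f for f in data_files if keep(f)]
-- ===== Notes on version B (the rewrite author's own statement) =====
-- stated objective: simpler
-- what changed: A rebuilds the list with up to seven successive filter comprehensions driven by the config flags; B computes one per-file boolean predicate (branch logic plus the OUTROS check folded together) and keeps each file in a single pass.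
import Mathlib
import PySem

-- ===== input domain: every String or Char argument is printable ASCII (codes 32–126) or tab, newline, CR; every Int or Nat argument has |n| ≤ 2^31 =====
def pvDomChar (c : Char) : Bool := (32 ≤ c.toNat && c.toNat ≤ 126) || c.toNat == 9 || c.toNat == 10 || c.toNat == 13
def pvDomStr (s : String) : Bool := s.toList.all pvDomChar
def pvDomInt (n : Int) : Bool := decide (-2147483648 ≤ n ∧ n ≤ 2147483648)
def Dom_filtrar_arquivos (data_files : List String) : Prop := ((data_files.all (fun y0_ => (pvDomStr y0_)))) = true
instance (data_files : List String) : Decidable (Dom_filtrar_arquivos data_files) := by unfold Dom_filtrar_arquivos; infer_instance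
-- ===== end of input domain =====

-- B replaces A's chain of successive filter comprehensions by ONE per-file predicate and a single pass (objective: simpler).

-- module-level constant shared by both versions
def considerar_arquivos : PySem.Dict String Bool :=
  PySem.Dict.ofList [("ORT", false), ("SYLABS", false), ("UBLOX", false),
                     ("4T", true), ("3T", false), ("OUTROS", false)]

-- ===== PORT A =====
-- all keys are present in the literal dict, so d[k] = getD d k false exactly
def filtrar_arquivos (data_files : List String) : List String :=
  let c : String → Bool := fun k => PySem.Dict.getD considerar_arquivos k false
  let data_files :=
    if c "ORT" && !(c "4T") then
      data_files.filter (fun f => PySem.Str.startswith f "ORT")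
    else if !(c "ORT") && c "4T" then
      data_files.filter (fun f => PySem.Str.isIn "4T" f && !(PySem.Str.startswith f "ORT"))
    else
      let d1 := if !(c "ORT") then data_files.filter (fun f => !(PySem.Str.startswith f "ORT")) else data_files
      let d2 := if !(c "SYLABS") then d1.filter (fun f => !(PySem.Str.isIn "SYLABS" f)) else d1
      let d3 := if !(c "UBLOX") then d2.filter (fun f => !(PySem.Str.isIn "UBLOX" f)) else d2
      let d4 := if !(c "4T") then d3.filter (fun f => !(PySem.Str.isIn "4T" f)) else d3
      if !(c "3T") then d4.filter (fun f => !(PySem.Str.isIn "3T" f)) else d4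
  if !(c "OUTROS") then
    data_files.filter (fun f =>
      PySem.Str.startswith f "ORT" || PySem.Str.isIn "SYLABS" f ||
      PySem.Str.isIn "UBLOX" f || PySem.Str.isIn "4T" f || PySem.Str.isIn "3T" f)
  else data_files

-- ===== PORT B =====
def pvKeep (f : String) : Bool :=
  let c : String → Bool := fun k => PySem.Dict.getD considerar_arquivos k false
  let ok :=
    if c "ORT" && !(c "4T") then
      PySem.Str.startswith f "ORT"
    else if !(c "ORT") && c "4T" then
      PySem.Str.isIn "4T" f && !(PySem.Str.startswith f "ORT")
    else
      (c "ORT" || !(PySem.Str.startswith f "ORT")) &&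
      (c "SYLABS" || !(PySem.Str.isIn "SYLABS" f)) &&
      (c "UBLOX" || !(PySem.Str.isIn "UBLOX" f)) &&
      (c "4T" || !(PySem.Str.isIn "4T" f)) &&
      (c "3T" || !(PySem.Str.isIn "3T" f))
  if !(c "OUTROS") then
    ok && (PySem.Str.startswith f "ORT" || PySem.Str.isIn "SYLABS" f ||
           PySem.Str.isIn "UBLOX" f || PySem.Str.isIn "4T" f || PySem.Str.isIn "3T" f)
  else ok

def filtrar_arquivos_alt (data_files : List String) : List String :=
  data_files.filter pvKeep

-- ===== PRECONDITION & SPEC =====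
def Spec_filtrar_arquivos (data_files : List String) (out : List String) : Prop := out = filtrar_arquivos_alt data_files
instance (data_files : List String) (out : List String) : Decidable (Spec_filtrar_arquivos data_files out) := by unfold Spec_filtrar_arquivos; infer_instance

-- ===== CLAIM (what is proved, stated in full; the proofs are below) =====
def Claim_equal_filtrar_arquivos : Prop := ∀ (data_files : List String), Dom_filtrar_arquivos data_files → Spec_filtrar_arquivos data_files (filtrar_arquivos data_files)

-- ===== LEMMAS AND PROOFS =====
theorem pvKeep_eq (f : String) :
    pvKeep f = ((PySem.Str.isIn "4T" f && !(PySem.Str.startswith f "ORT")) &&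
      (PySem.Str.startswith f "ORT" || PySem.Str.isIn "SYLABS" f ||
       PySem.Str.isIn "UBLOX" f || PySem.Str.isIn "4T" f || PySem.Str.isIn "3T" f)) := by
  unfold pvKeep
  rfl

theorem filtrar_eq (data_files : List String) :
    filtrar_arquivos data_files =
      (data_files.filter (fun f => PySem.Str.isIn "4T" f && !(PySem.Str.startswith f "ORT"))).filter
        (fun f => PySem.Str.startswith f "ORT" || PySem.Str.isIn "SYLABS" f ||
                  PySem.Str.isIn "UBLOX" f || PySem.Str.isIn "4T" f || PySem.Str.isIn "3T" f) := by
  unfold filtrar_arquivos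
  rfl

-- ===== VERDICT (by name: the statement is the Claim_ definition above) =====
theorem filtrar_arquivos_spec : Claim_equal_filtrar_arquivos := by
  intro data_files _
  unfold Spec_filtrar_arquivos filtrar_arquivos_alt
  rw [filtrar_eq, List.filter_filter]
  refine List.filter_congr (fun f _ => ?_)
  rw [pvKeep_eq, Bool.and_comm]
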